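-- pv_equiv track=rewrite | github.com/DivyaThakur24/SkillBridge | src/voice_agent/intent.py | _guess_path
-- ===== SOURCE A (Python) =====
-- def _guess_path(text: str) -> str | None:
--     for suffix in [".py", ".txt", ".md", ".json", ".html", ".js"]:
--         marker = text.find(suffix)
--         if marker != -1:
--             start = marker
--             while start > 0 and text[start - 1] not in {" ", '"', "'", ":"}:
--                 start -= 1
--             return text[start : marker + len(suffix)].strip().strip("\"'")
--     return None
-- ===== SOURCE B (Python) =====
-- def _guess_path(text: str) -> str | None:
--     suffixes = (".py", ".txt", ".md", ".json", ".html", ".js")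
--     seen = {}
--     last = 0
--     for i, c in enumerate(text):
--         if c in ' "\':':
--             last = i + 1
--         else:
--             for s in suffixes:
--                 if s not in seen and text.startswith(s, i):
--                     seen[s] = text[last:i + len(s)].strip()
--     for s in suffixes:
--         if s in seen:
--             return seen[s]
--     return None
-- ===== Notes on version B (the rewrite author's own statement) =====
-- stated objective: alternative
-- what changed: Instead of one text.find plus a backward delimiter walk per suffix, B makes a single forward pass over the text, tracking the index after the most recent delimiter and recording in a dict, for each suffix, the token slice at its first match; afterwards it returns the recorded value of the highest-priority suffix, and the quote-strip disappears because the recorded token can contain no quote.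
import Mathlib
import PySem

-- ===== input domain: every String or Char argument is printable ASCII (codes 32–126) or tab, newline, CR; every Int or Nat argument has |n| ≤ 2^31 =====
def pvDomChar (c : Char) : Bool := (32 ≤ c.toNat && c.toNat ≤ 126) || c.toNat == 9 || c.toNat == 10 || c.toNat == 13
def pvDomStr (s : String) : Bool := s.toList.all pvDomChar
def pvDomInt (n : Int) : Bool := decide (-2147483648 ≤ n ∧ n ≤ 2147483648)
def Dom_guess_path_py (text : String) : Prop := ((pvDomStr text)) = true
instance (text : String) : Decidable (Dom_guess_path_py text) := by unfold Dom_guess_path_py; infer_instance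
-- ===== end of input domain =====

-- B replaces A's per-suffix find + backward delimiter walk by ONE forward pass that tracks the
-- index after the most recent delimiter and records, per suffix, the token slice at its first
-- match in a dict; the answer is the highest-priority recorded suffix. Same cost, different shape.

-- ===== PORT A =====
def pvDelims : List Char := [' ', '"', '\'', ':']

def pvSuffixes : List (List Char) :=
  [['.','p','y'], ['.','t','x','t'], ['.','m','d'], ['.','j','s','o','n'], ['.','h','t','m','l'], ['.','j','s']]

-- A's while loop: decrement start while start > 0 and text[start-1] not a delimiter
def pvWalk (cs : List Char) : Nat → Nat
  | 0 => 0
  | m + 1 => if (cs[m]?.getD ' ') ∈ pvDelims then m + 1 else pvWalk cs m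

def pvTryA (cs : List Char) : List (List Char) → Option String
  | [] => none
  | suf :: rest =>
    let marker := PySem.Chars.find cs suf
    if marker ≠ -1 then
      let start := pvWalk cs marker.toNat
      some (String.ofList (PySem.Chars.stripChars
        (PySem.Chars.strip (PySem.List.slice cs (some (start : Int)) (some (marker + suf.length))))
        ['"', '\'']))
    else pvTryA cs rest

def guess_path_py (text : String) : Option String := pvTryA text.toList pvSuffixes

-- ===== PORT B =====
-- inner 'for s in suffixes' body: 'if s not in seen and text.startswith(s, i): seen[s] = text[last:i+len(s)].strip()'
-- (text.startswith(s, i) with 0 ≤ i ≤ len(text) — enumerate guarantees that — is exactly s.isPrefixOf (cs.drop i))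
def pvStepSuf (cs : List Char) (last : Int) (i : Nat)
    (d : PySem.Dict (List Char) (List Char)) (s : List Char) : PySem.Dict (List Char) (List Char) :=
  if d.contains s = false ∧ s.isPrefixOf (cs.drop i) = true then
    d.insert s (PySem.Chars.strip (PySem.List.slice cs (some last) (some ((i : Int) + s.length))))
  else d

-- one iteration of 'for i, c in enumerate(text)': state is (last, seen)
def pvStep (cs : List Char) (st : Int × PySem.Dict (List Char) (List Char)) (ic : Int × Char) :
    Int × PySem.Dict (List Char) (List Char) :=
  if ic.2 ∈ pvDelims then (ic.1 + 1, st.2)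
  else (st.1, pvSuffixes.foldl (pvStepSuf cs st.1 ic.1.toNat) st.2)

-- final 'for s in suffixes: if s in seen: return seen[s]'
def pvRet (d : PySem.Dict (List Char) (List Char)) : List (List Char) → Option String
  | [] => none
  | s :: rest =>
    match d.get? s with
    | some v => some (String.ofList v)
    | none => pvRet d rest

def guess_path_py_alt (text : String) : Option String :=
  let cs := text.toList
  let st := (PySem.List.enumerate cs).foldl (pvStep cs) (0, PySem.Dict.empty)
  pvRet st.2 pvSuffixes

-- ===== PRECONDITION & SPEC =====
def Spec_guess_path_py (text : String) (out : Option String) : Prop := out = guess_path_py_alt text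
instance (text : String) (out : Option String) : Decidable (Spec_guess_path_py text out) := by unfold Spec_guess_path_py; infer_instance

-- ===== CLAIM (what is proved, stated in full; the proofs are below) =====
def Claim_equal_guess_path_py : Prop := ∀ (text : String), Dom_guess_path_py text → Spec_guess_path_py text (guess_path_py text)

-- ===== LEMMAS AND PROOFS =====

-- A's value for one suffix, before the (no-op) quote strip
def pvAval (cs s : List Char) : List Char :=
  PySem.Chars.strip (PySem.List.slice cs
    (some ((pvWalk cs (PySem.Chars.find cs s).toNat : Nat) : Int))
    (some (PySem.Chars.find cs s + s.length)))

-- the seen-dict's lookup after processing positions [0, i)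
def pvSpecSeen (cs : List Char) (i : Nat) (s : List Char) : Option (List Char) :=
  if 0 ≤ PySem.Chars.find cs s ∧ PySem.Chars.find cs s < (i : Int) then some (pvAval cs s) else none

theorem pvSuf_props (s : List Char) (hs : s ∈ pvSuffixes) :
    (∃ t, s = '.' :: t) ∧ ∀ c ∈ s, c ∉ pvDelims := by
  simp only [pvSuffixes, List.mem_cons, List.not_mem_nil, or_false] at hs
  rcases hs with rfl | rfl | rfl | rfl | rfl | rfl <;> exact ⟨⟨_, rfl⟩, by simp [pvDelims]⟩

theorem pvFind_lt_len (cs s : List Char) (hs : s ≠ [])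
    (h : 0 ≤ PySem.Chars.find cs s) : (PySem.Chars.find cs s).toNat < cs.length := by
  have hpre := (PySem.Chars.find_spec h).1
  have hle := PySem.Chars.find_le_length cs s
  have hlen := hpre.length_le
  simp only [List.length_drop] at hlen
  cases s with
  | nil => exact absurd rfl hs
  | cons a t => simp at hlen; omega

theorem pvFind_le_of_prefix (cs s : List Char) (i : Nat) (h : s.isPrefixOf (cs.drop i) = true) :
    0 ≤ PySem.Chars.find cs s ∧ (PySem.Chars.find cs s).toNat ≤ i := by
  rw [List.isPrefixOf_iff_prefix] at h
  have hin : PySem.Chars.isIn s cs = true :=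
    (PySem.Chars.exists_prefix_drop_iff_isIn s cs).mp ⟨i, h⟩
  have hfind : PySem.Chars.find cs s ≠ -1 := by
    rw [PySem.Chars.find_ne_neg_one_iff]
    exact (PySem.Chars.isIn_iff_infix s cs).mp hin
  have h0 : 0 ≤ PySem.Chars.find cs s := by
    have := PySem.Chars.neg_one_le_find cs s; omega
  refine ⟨h0, ?_⟩
  by_contra hlt
  exact (PySem.Chars.find_spec h0).2 i (by omega) h

-- the inner suffix fold, lookup-wise
theorem pvFoldSuf_get (cs : List Char) (last : Int) (i : Nat) (ss : List (List Char))
    (hnd : ss.Nodup) (d : PySem.Dict (List Char) (List Char)) (s : List Char) :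
    (ss.foldl (pvStepSuf cs last i) d).get? s =
      if s ∈ ss ∧ d.get? s = none ∧ s.isPrefixOf (cs.drop i) = true then
        some (PySem.Chars.strip (PySem.List.slice cs (some last) (some ((i : Int) + s.length))))
      else d.get? s := by
  induction ss generalizing d with
  | nil => simp
  | cons a rest ih =>
    have hnd' : rest.Nodup := hnd.of_cons
    rw [List.foldl_cons, ih hnd' _]
    by_cases has : s = a
    · subst has
      have hsr : s ∉ rest := by simpa using (List.nodup_cons.mp hnd).1
      by_cases hc : d.get? s = none ∧ s.isPrefixOf (cs.drop i) = true
      · have hcontains : d.contains s = false := by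
          rw [PySem.Dict.contains_eq_isSome_get?, hc.1]; rfl
        rw [show pvStepSuf cs last i d s =
              d.insert s (PySem.Chars.strip (PySem.List.slice cs (some last) (some ((i : Int) + s.length)))) by
            rw [pvStepSuf, if_pos ⟨hcontains, hc.2⟩]]
        rw [PySem.Dict.get?_insert_self]
        rw [if_neg (by simp [hsr]), if_pos ⟨by simp, hc⟩]
      · have : ¬ (d.contains s = false ∧ s.isPrefixOf (cs.drop i) = true) := by
          rw [PySem.Dict.contains_eq_isSome_get?]
          intro h
          exact hc ⟨Option.not_isSome_iff_eq_none.mp (by simpa using h.1), h.2⟩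
        rw [pvStepSuf, if_neg this]
        rw [if_neg (by simp [hsr]), if_neg (by rintro ⟨-, h2, h3⟩; exact hc ⟨h2, h3⟩)]
    · have hget : (pvStepSuf cs last i d a).get? s = d.get? s := by
        rw [pvStepSuf]; split
        · rw [PySem.Dict.get?_insert, if_neg has]
        · rfl
      rw [hget]
      simp [has]

-- pvWalk's step equation with the character made explicit
theorem pvWalk_succ (cs : List Char) (i : Nat) (c : Char) (hc : cs[i]? = some c) :
    pvWalk cs (i + 1) = if c ∈ pvDelims then i + 1 else pvWalk cs i := by
  simp [pvWalk, hc]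

-- main loop invariant, by induction on the unprocessed tail
theorem pvFold_inv (cs : List Char) (tl : List Char) : ∀ (i : Nat)
    (st : Int × PySem.Dict (List Char) (List Char)),
    cs.drop i = tl → st.1 = ((pvWalk cs i : Nat) : Int) →
    (∀ s ∈ pvSuffixes, st.2.get? s = pvSpecSeen cs i s) →
    (∀ s ∈ pvSuffixes,
      ((PySem.List.enumerate tl (i : Int)).foldl (pvStep cs) st).2.get? s = pvSpecSeen cs cs.length s) := by
  induction tl with
  | nil =>
    intro i st hdrop hlast hseen s hs
    have hlen : cs.length ≤ i := by
      have := congrArg List.length hdrop; simp at this; omega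
    simp only [PySem.List.enumerate, List.foldl_nil]
    rw [hseen s hs]
    obtain ⟨⟨t, rfl⟩, _⟩ := pvSuf_props s hs
    unfold pvSpecSeen
    by_cases h0 : 0 ≤ PySem.Chars.find cs ('.' :: t)
    · have := pvFind_lt_len cs ('.' :: t) (by simp) h0
      rw [if_pos ⟨h0, by omega⟩, if_pos ⟨h0, by omega⟩]
    · rw [if_neg (by tauto), if_neg (by tauto)]
  | cons c tl' ih =>
    intro i st hdrop hlast hseen
    have hi : i < cs.length := by
      by_contra h
      rw [List.drop_eq_nil_of_le (by omega)] at hdrop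
      exact (by simp at hdrop : False)
    have hci : cs[i]? = some c := by
      have h := congrArg (fun l => l[0]?) hdrop
      simpa using h
    have hdrop' : cs.drop (i + 1) = tl' := by
      have : cs.drop (i+1) = (cs.drop i).drop 1 := by rw [List.drop_drop]
      rw [this, hdrop]; rfl
    have henum : PySem.List.enumerate (c :: tl') (i : Int) =
        ((i : Int), c) :: PySem.List.enumerate tl' ((i : Int) + 1) := rfl
    rw [henum, List.foldl_cons]
    have hcast : ((i : Int) + 1) = (((i + 1 : Nat) : Int)) := by push_cast; ring
    rw [hcast]
    by_cases hcd : c ∈ pvDelims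
    · -- delimiter: last becomes i+1, seen unchanged
      have hstep : pvStep cs st ((i : Int), c) = ((i : Int) + 1, st.2) := by
        simp [pvStep, hcd]
      rw [hstep]
      apply ih (i + 1) _ hdrop'
      · rw [pvWalk_succ cs i c hci, if_pos hcd]; push_cast; ring
      · intro s hs
        rw [hseen s hs]
        -- no suffix starts at a delimiter position, so the condition find < i ↔ find < i+1
        obtain ⟨⟨t, rfl⟩, _⟩ := pvSuf_props s hs
        unfold pvSpecSeen
        by_cases hcond : 0 ≤ PySem.Chars.find cs ('.' :: t) ∧ PySem.Chars.find cs ('.' :: t) < (i : Int)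
        · have h2 : 0 ≤ PySem.Chars.find cs ('.' :: t) ∧
              PySem.Chars.find cs ('.' :: t) < ((i + 1 : Nat) : Int) := by
            obtain ⟨ha, hb⟩ := hcond; exact ⟨ha, by push_cast; omega⟩
          rw [if_pos hcond, if_pos h2]
        · rw [if_neg hcond]
          rw [if_neg ?_]
          intro ⟨h0, hlt⟩
          have hne : PySem.Chars.find cs ('.' :: t) ≠ (i : Int) := by
            intro he
            have hpre := (PySem.Chars.find_spec h0).1
            rw [he] at hpre
            simp only [Int.toNat_natCast] at hpre
            rw [hdrop] at hpre
            obtain ⟨l, hl⟩ := hpre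
            have : c = '.' := by
              have := congrArg (fun x => x[0]?) hl
              simpa [eq_comm] using this
            rw [this] at hcd
            exact (by simp [pvDelims] : '.' ∉ pvDelims) hcd
          have : PySem.Chars.find cs ('.' :: t) < (i : Int) := by
            push_cast at hlt; omega
          exact hcond ⟨h0, this⟩
    · -- non-delimiter: last unchanged, suffix fold records first matches
      have hstep : pvStep cs st ((i : Int), c) =
          (st.1, pvSuffixes.foldl (pvStepSuf cs st.1 i) st.2) := by
        simp [pvStep, hcd]
      rw [hstep]
      apply ih (i + 1) _ hdrop'
      · rw [pvWalk_succ cs i c hci, if_neg hcd]; exact hlast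
      · intro s hs
        obtain ⟨⟨t, hst⟩, _⟩ := pvSuf_props s hs
        have hsne : s ≠ [] := by rw [hst]; simp
        rw [pvFoldSuf_get cs st.1 i pvSuffixes (by simp [pvSuffixes]) st.2 s, hseen s hs]
        unfold pvSpecSeen
        by_cases hlt : 0 ≤ PySem.Chars.find cs s ∧ PySem.Chars.find cs s < (i : Int)
        · -- already recorded
          have h2 : 0 ≤ PySem.Chars.find cs s ∧
              PySem.Chars.find cs s < ((i + 1 : Nat) : Int) := by
            obtain ⟨ha, hb⟩ := hlt; exact ⟨ha, by push_cast; omega⟩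
          rw [if_pos hlt, if_neg (by simp), if_pos h2]
        · by_cases heq : PySem.Chars.find cs s = (i : Int)
          · -- first match is at i: gets recorded now, with last = pvWalk cs i
            have h0 : 0 ≤ PySem.Chars.find cs s := by rw [heq]; positivity
            have hpre : s.isPrefixOf (cs.drop i) = true := by
              rw [List.isPrefixOf_iff_prefix]
              have := (PySem.Chars.find_spec h0).1
              rwa [heq, Int.toNat_natCast] at this
            have h2 : 0 ≤ PySem.Chars.find cs s ∧
                PySem.Chars.find cs s < ((i + 1 : Nat) : Int) := by
              constructor
              · exact h0
              · rw [heq]; push_cast; omega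
            rw [if_pos ⟨hs, by simp [hlt], hpre⟩, if_pos h2]
            unfold pvAval
            rw [heq, hlast, Int.toNat_natCast]
          · -- no match at or before i: nothing recorded, condition still false at i+1
            have hnpre : ¬ s.isPrefixOf (cs.drop i) = true := by
              intro hp
              obtain ⟨h0, hle⟩ := pvFind_le_of_prefix cs s i hp
              have : PySem.Chars.find cs s < (i : Int) ∨ PySem.Chars.find cs s = (i : Int) := by
                omega
              rcases this with h | h
              · exact hlt ⟨h0, h⟩
              · exact heq h
            rw [if_neg (by tauto), if_neg (by simp; omega),
                if_neg (by
                  intro ⟨h0, hlt'⟩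
                  push_cast at hlt'
                  have : PySem.Chars.find cs s < (i : Int) ∨ PySem.Chars.find cs s = (i : Int) := by
                    omega
                  rcases this with h | h
                  · exact hlt ⟨h0, h⟩
                  · exact heq h)]

-- ===== quote-free-slice facts (the stripChars in A is a no-op) =====

theorem pvDropWhile_all_false {p : Char → Bool} (s : List Char) (h : ∀ c ∈ s, p c = false) :
    List.dropWhile p s = s := by
  cases s with
  | nil => rfl
  | cons x xs => rw [List.dropWhile_cons, h x (by simp)]; simp

theorem pvStripChars_id (s : List Char) (chars : List Char)
    (h : ∀ c ∈ s, ¬ chars.contains c = true) : PySem.Chars.stripChars s chars = s := by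
  rw [PySem.Chars.stripChars]
  rw [pvDropWhile_all_false s (fun c hc => by simpa using h c hc)]
  rw [pvDropWhile_all_false s.reverse (fun c hc => by simpa using h c (by simpa using hc))]
  exact List.reverse_reverse s

theorem pvStrip_subset (s : List Char) (c : Char) (hc : c ∈ PySem.Chars.strip s) : c ∈ s := by
  simp only [PySem.Chars.strip, PySem.Chars.rstrip, PySem.Chars.lstrip, List.mem_reverse] at hc
  have h1 := (List.dropWhile_sublist (l := (List.dropWhile PySem.Chars.isspace s).reverse)
    (p := PySem.Chars.isspace)).subset hc
  rw [List.mem_reverse] at h1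
  exact (List.dropWhile_sublist (l := s) (p := PySem.Chars.isspace)).subset h1

theorem pvWalk_le (cs : List Char) (m : Nat) : pvWalk cs m ≤ m := by
  induction m with
  | zero => simp [pvWalk]
  | succ m ih => simp only [pvWalk]; split <;> omega

theorem pvWalk_region (cs : List Char) (m j : Nat) (h1 : pvWalk cs m ≤ j) (h2 : j < m)
    (c : Char) (hc : cs[j]? = some c) : c ∉ pvDelims := by
  induction m with
  | zero => omega
  | succ m ih =>
    by_cases hd : (cs[m]?.getD ' ') ∈ pvDelims
    · simp only [pvWalk, if_pos hd] at h1; omega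
    · simp only [pvWalk, if_neg hd] at h1
      rcases Nat.lt_succ_iff_lt_or_eq.mp h2 with h | h
      · exact ih h1 h
      · subst h; rw [hc] at hd; simpa using hd

theorem pvSlice_no_quote (cs suf : List Char) (hq : ∀ c ∈ suf, c ∉ pvDelims)
    (he : 0 ≤ PySem.Chars.find cs suf) (c : Char)
    (hc : c ∈ PySem.List.slice cs (some ((pvWalk cs (PySem.Chars.find cs suf).toNat : Nat) : Int))
            (some (PySem.Chars.find cs suf + suf.length))) :
    c ∉ pvDelims := by
  set e := PySem.Chars.find cs suf with hedef
  have hpre : suf <+: cs.drop e.toNat := (PySem.Chars.find_spec he).1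
  have hel : e ≤ cs.length := PySem.Chars.find_le_length cs suf
  have hlen : e.toNat + suf.length ≤ cs.length := by
    have := hpre.length_le
    simp at this
    omega
  have hw := pvWalk_le cs e.toNat
  set w := pvWalk cs e.toNat with hwdef
  have hsl : PySem.List.slice cs (some ((w : Nat) : Int)) (some (e + suf.length)) =
      (cs.drop w).take (e.toNat + suf.length - w) := by
    rw [PySem.List.slice]
    simp only [PySem.List.clampIdx]
    have h1 : ¬ ((w : Int) < 0) := not_lt.mpr (Int.natCast_nonneg w)
    have h2 : ¬ (e + (suf.length : Int) < 0) := by omega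
    rw [if_neg h1, if_neg h2]
    have : (e + (suf.length : Int)).toNat = e.toNat + suf.length := by omega
    rw [this]
    have h3 : min (w : Int).toNat cs.length = w := by simp; omega
    have h4 : min (e.toNat + suf.length) cs.length = e.toNat + suf.length := by omega
    rw [h3, h4]
  rw [hsl] at hc
  obtain ⟨i, hi, hx⟩ := List.getElem_of_mem hc
  have hil : i < e.toNat + suf.length - w := by
    have := hi
    simp at this
    omega
  have hiw : w + i < cs.length := by
    have := hi
    simp at this
    omega
  have hcs : cs[w + i]'hiw = c := by
    rw [← hx, List.getElem_take, List.getElem_drop]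
  by_cases hje : w + i < e.toNat
  · exact pvWalk_region cs e.toNat (w + i) (by omega) hje c
      (by rw [List.getElem?_eq_getElem hiw, hcs])
  · have hk : w + i - e.toNat < suf.length := by omega
    have := hpre.getElem hk
    rw [List.getElem_drop] at this
    have hidx : e.toNat + (w + i - e.toNat) = w + i := by omega
    apply hq c
    simp only [hidx] at this
    rw [← hcs, ← this]
    exact List.getElem_mem _

theorem pvQuote_sub (c : Char) (h : c ∉ pvDelims) : ¬ (['"', '\''].contains c = true) := by
  simp [pvDelims] at h
  simp
  tauto

-- A's per-suffix value with the (no-op) quote strip removed is pvAval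
theorem pvTryA_eq_ret (cs : List Char) (d : PySem.Dict (List Char) (List Char))
    (ss : List (List Char)) (hsub : ∀ s ∈ ss, s ∈ pvSuffixes)
    (hd : ∀ s ∈ ss, d.get? s = pvSpecSeen cs cs.length s) :
    pvRet d ss = pvTryA cs ss := by
  induction ss with
  | nil => rfl
  | cons s rest ih =>
    have hs := hsub s (by simp)
    obtain ⟨⟨t, hst⟩, hq⟩ := pvSuf_props s hs
    have hsne : s ≠ [] := by rw [hst]; simp
    have hd0 := hd s (by simp)
    by_cases h0 : 0 ≤ PySem.Chars.find cs s
    · have hlt := pvFind_lt_len cs s hsne h0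
      have hsome : d.get? s = some (pvAval cs s) := by
        rw [hd0]; unfold pvSpecSeen; rw [if_pos ⟨h0, by omega⟩]
      have hne : PySem.Chars.find cs s ≠ -1 := by omega
      have hqf : PySem.Chars.stripChars
          (PySem.Chars.strip (PySem.List.slice cs
            (some ((pvWalk cs (PySem.Chars.find cs s).toNat : Nat) : Int))
            (some (PySem.Chars.find cs s + s.length)))) ['"', '\''] = pvAval cs s := by
        unfold pvAval
        rw [pvStripChars_id]
        intro c hc
        exact pvQuote_sub c (pvSlice_no_quote cs s hq h0 c (pvStrip_subset _ c hc))
      simp only [pvRet, pvTryA, hsome, hne, ne_eq, not_false_eq_true, if_true, hqf]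
    · have hnone : d.get? s = none := by
        rw [hd0]; unfold pvSpecSeen; rw [if_neg (by tauto)]
      have heq : PySem.Chars.find cs s = -1 := by
        have := PySem.Chars.neg_one_le_find cs s; omega
      simp only [pvRet, pvTryA, hnone, heq, ne_eq, not_true_eq_false, if_false]
      exact ih (fun x hx => hsub x (by simp [hx])) (fun x hx => hd x (by simp [hx]))

-- ===== VERDICT (by name: the statement is the Claim_ definition above) =====
theorem guess_path_py_spec : Claim_equal_guess_path_py := by
  intro text _
  unfold Spec_guess_path_py guess_path_py guess_path_py_alt
  set cs := text.toList
  have hinv := pvFold_inv cs cs 0 (0, PySem.Dict.empty) (by simp) (by simp [pvWalk])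
    (by intro s hs; simp [pvSpecSeen, PySem.Dict.get?_empty])
  exact (pvTryA_eq_ret cs _ pvSuffixes (fun s hs => hs)
    (by simpa using hinv)).symm
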